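-- pv_equiv track=rewrite | github.com/DeepMIMO/DeepMIMO | deepmimo/api/upload.py | _generate_key_components
-- ===== SOURCE A (Python) =====
-- def _generate_key_components(summary_str: str) -> dict:
--     """Generate key components sections from summary string.
--
--     Args:
--         summary_str: Summary string from scenario containing sections in [Section Name] format
--                     followed by their descriptions
--
--     Returns:
--         Dictionary containing sections with their names and HTML-formatted descriptions
--
--     """
--     html_dict = {"sections": []}
--     current_section = None
--     current_lines = []
--
--     for line_str in summary_str.split("\n"):
--         line = line_str.strip()
--         if not line or line.startswith("="):  # Skip empty lines and separator lines
--             continue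
--
--         if line.startswith("[") and line.endswith("]"):
--             # Process previous section if it exists
--             if current_section:
--                 html_dict["sections"].append(_format_section(current_section, current_lines))
--
--             # Start new section
--             current_section = line[1:-1]
--             current_lines = []
--         elif current_section:
--             current_lines.append(line)
--
--     # Add the final section
--     if current_section:
--         html_dict["sections"].append(_format_section(current_section, current_lines))
--
--     return html_dict
--
-- def _format_section(name: str, lines: list) -> dict:
--     """Format a section's content into proper HTML with consistent styling.
--
--     Args:
--         name: Section name
--         lines: List of content lines for the section
--
--     Returns:
--         Formatted section dictionary with name and HTML description
--
--     """
--     # Group content by subsections (lines starting with newline)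
--     subsections = []
--     current_subsection = []
--
--     for line in lines:
--         if line and not line.startswith("-"):  # New subsection header
--             if current_subsection:
--                 subsections.append(current_subsection)
--             current_subsection = [line]
--         elif line:  # Content line
--             current_subsection.append(line)
--
--     if current_subsection:
--         subsections.append(current_subsection)
--
--     # Build HTML content
--     html_parts = []
--     for subsection in subsections:
--         if len(subsection) == 1:  # Single line - use paragraph
--             html_parts.append(f"<p>{subsection[0]}</p>")
--         else:  # Multiple lines - use header and list
--             header = subsection[0]
--             items = [line[2:] for line in subsection[1:]]  # Remove "- " prefix
--
--             html_parts.append(f"<h4>{header}</h4>")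
--             html_parts.append("<ul>")
--             html_parts.extend(f"<li>{item}</li>" for item in items)
--             html_parts.append("</ul>")
--
--     return {
--         "name": name,
--         "description": f"""
--             <div class="section-content">
--                 {"".join(html_parts)}
--             </div>
--         """,
--     }
-- ===== SOURCE B (Python) =====
-- def _generate_key_components(summary_str: str) -> dict:
--     # Phase 1: parse into a nested tree [(section_name, [subsection_line_lists])]
--     tree = []
--     for raw in summary_str.split("\n"):
--         line = raw.strip()
--         if not line or line.startswith("="):
--             continue
--         if line.startswith("[") and line.endswith("]"):
--             tree.append((line[1:-1], []))
--         elif tree: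
--             subs = tree[-1][1]
--             if line.startswith("-") and subs:
--                 subs[-1].append(line)
--             else:
--                 subs.append([line])
--     # Phase 2: render the tree, dropping sections with empty names
--     return {"sections": [_render_section(name, subs) for name, subs in tree if name]}
--
--
-- def _render_section(name: str, subs: list) -> dict:
--     parts = []
--     for sub in subs:
--         if len(sub) == 1:
--             parts.append(f"<p>{sub[0]}</p>")
--         else:
--             items = "".join(f"<li>{line[2:]}</li>" for line in sub[1:])
--             parts.append(f"<h4>{sub[0]}</h4><ul>{items}</ul>")
--     body = "".join(parts)
--     return {
--         "name": name,
--         "description": f"""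
--             <div class="section-content">
--                 {body}
--             </div>
--         """,
--     }
-- ===== Notes on version B (the rewrite author's own statement) =====
-- stated objective: alternative
-- what changed: B splits A's interleaved loop (which formats a section's HTML whenever the next section header closes it) into two passes: one scan parses the summary into a nested (section, subsection-line-lists) tree, then a purely functional rendering pass maps each tree node to its HTML dict, concatenating each subsection into a single string instead of A's flat html_parts list.
import Mathlib
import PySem

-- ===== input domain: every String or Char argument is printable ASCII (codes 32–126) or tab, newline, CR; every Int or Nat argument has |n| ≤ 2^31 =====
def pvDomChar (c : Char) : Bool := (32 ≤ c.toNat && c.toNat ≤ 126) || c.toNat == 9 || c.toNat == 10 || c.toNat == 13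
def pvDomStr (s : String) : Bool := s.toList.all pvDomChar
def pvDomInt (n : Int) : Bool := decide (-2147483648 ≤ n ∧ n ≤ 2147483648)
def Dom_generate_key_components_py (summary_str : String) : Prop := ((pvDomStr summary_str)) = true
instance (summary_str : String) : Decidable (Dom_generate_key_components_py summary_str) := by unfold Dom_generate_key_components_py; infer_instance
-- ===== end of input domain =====

-- B separates parsing into a nested (section, subsections) tree from a second, purely
-- functional rendering pass, instead of A's interleaved format-on-section-close loop
-- (objective: alternative decomposition; same asymptotic cost).

-- ===== PORT A =====

-- Python truthiness of `current_section` (None or str): falsy iff None or "".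
def pvTruthy : Option String → Bool
  | none => false
  | some s => s != ""

-- _format_section's grouping loop body.
def pvFmtGroupStep (st : List (List String) × List String) (line : String) :
    List (List String) × List String :=
  if line ≠ "" ∧ PySem.Str.startswith line "-" = false then
    (if st.2 ≠ [] then st.1 ++ [st.2] else st.1, [line])
  else if line ≠ "" then (st.1, st.2 ++ [line])
  else st

-- _format_section's html_parts loop body (subsection[0] is pyGetD; subsections are never empty here).
def pvHtmlStepA (parts : List String) (sub : List String) : List String :=
  if sub.length = 1 then parts ++ ["<p>" ++ PySem.List.pyGetD sub 0 "" ++ "</p>"]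
  else
    let header := PySem.List.pyGetD sub 0 ""
    let items := (PySem.List.slice sub (some 1) none).map (fun l => PySem.Str.slice l (some 2) none)
    parts ++ (["<h4>" ++ header ++ "</h4>", "<ul>"] ++ items.map (fun it => "<li>" ++ it ++ "</li>") ++ ["</ul>"])

-- _format_section
def pvFormatSection (name : String) (lines : List String) : List (String × String) :=
  let st := lines.foldl pvFmtGroupStep ([], [])
  let subsections := if st.2 ≠ [] then st.1 ++ [st.2] else st.1
  let html_parts := subsections.foldl pvHtmlStepA []
  [("name", name),
   ("description",
    "\n            <div class=\"section-content\">\n                "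
      ++ PySem.Str.join "" html_parts
      ++ "\n            </div>\n        ")]

-- main loop body of _generate_key_components (state: current_section, current_lines, sections)
def pvStepA (st : Option String × List String × List (List (String × String)))
    (line_str : String) : Option String × List String × List (List (String × String)) :=
  let line := PySem.Str.strip line_str
  if line = "" ∨ PySem.Str.startswith line "=" = true then st
  else if PySem.Str.startswith line "[" = true ∧ PySem.Str.endswith line "]" = true then
    let secs := if pvTruthy st.1 then st.2.2 ++ [pvFormatSection (st.1.getD "") st.2.1] else st.2.2
    (some (PySem.Str.slice line (some 1) (some (-1))), [], secs)
  else if pvTruthy st.1 then (st.1, st.2.1 ++ [line], st.2.2) else st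

def generate_key_components_py (summary_str : String) : List (String × List (List (String × String))) :=
  -- split("\n"): sep is nonempty so split? always returns some
  let lines := (PySem.Str.split? summary_str "\n").getD []
  let fin := lines.foldl pvStepA (none, [], [])
  let secs := if pvTruthy fin.1 then fin.2.2 ++ [pvFormatSection (fin.1.getD "") fin.2.1] else fin.2.2
  [("sections", secs)]

-- ===== PORT B =====

-- appending a content line to the subsections of the current section (mutation of subs in Source B)
def pvSubStep (subs : List (List String)) (line : String) : List (List String) :=
  if PySem.Str.startswith line "-" = true ∧ subs ≠ [] then
    subs.dropLast ++ [(subs.getLast?.getD []) ++ [line]]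
  else subs ++ [[line]]

-- phase-1 loop body: builds the (name, subsections) tree; mutation of tree[-1] is dropLast ++ [updated]
def pvStepB (tree : List (String × List (List String))) (raw : String) :
    List (String × List (List String)) :=
  let line := PySem.Str.strip raw
  if line = "" ∨ PySem.Str.startswith line "=" = true then tree
  else if PySem.Str.startswith line "[" = true ∧ PySem.Str.endswith line "]" = true then
    tree ++ [(PySem.Str.slice line (some 1) (some (-1)), [])]
  else if tree ≠ [] then
    let last := PySem.List.pyGetD tree (-1) ("", [])
    tree.dropLast ++ [(last.1, pvSubStep last.2 line)]
  else tree

-- phase-2: render one subsection into its single html string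
def pvRenderSub (sub : List String) : String :=
  if sub.length = 1 then "<p>" ++ PySem.List.pyGetD sub 0 "" ++ "</p>"
  else
    let items := PySem.Str.join ""
      ((PySem.List.slice sub (some 1) none).map
        (fun l => "<li>" ++ PySem.Str.slice l (some 2) none ++ "</li>"))
    "<h4>" ++ PySem.List.pyGetD sub 0 "" ++ "</h4><ul>" ++ items ++ "</ul>"

-- _render_section
def pvRenderSection (name : String) (subs : List (List String)) : List (String × String) :=
  let parts := subs.foldl (fun parts sub => parts ++ [pvRenderSub sub]) []
  let body := PySem.Str.join "" parts
  [("name", name),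
   ("description",
    "\n            <div class=\"section-content\">\n                "
      ++ body
      ++ "\n            </div>\n        ")]

def generate_key_components_py_alt (summary_str : String) : List (String × List (List (String × String))) :=
  let lines := (PySem.Str.split? summary_str "\n").getD []
  let tree := lines.foldl pvStepB []
  [("sections", (tree.filter (fun p => p.1 != "")).map (fun p => pvRenderSection p.1 p.2))]

-- ===== PRECONDITION & SPEC =====
def Spec_generate_key_components_py (summary_str : String) (out : List (String × List (List (String × String)))) : Prop := out = generate_key_components_py_alt summary_str
instance (summary_str : String) (out : List (String × List (List (String × String)))) : Decidable (Spec_generate_key_components_py summary_str out) := by unfold Spec_generate_key_components_py; infer_instance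

-- ===== CLAIM (what is proved, stated in full; the proofs are below) =====
def Claim_equal_generate_key_components_py : Prop := ∀ (summary_str : String), Dom_generate_key_components_py summary_str → Spec_generate_key_components_py summary_str (generate_key_components_py summary_str)

-- ===== LEMMAS AND PROOFS =====

-- the rendered sections of a finished tree (B's phase 2)
def pvRenderAll (tree : List (String × List (List String))) : List (List (String × String)) :=
  (tree.filter (fun p => p.1 != "")).map (fun p => pvRenderSection p.1 p.2)

-- A's grouping of a full line list (foldl + final flush)
def pvGroupFlush (lines : List String) : List (List String) :=
  let st := lines.foldl pvFmtGroupStep ([], [])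
  if st.2 ≠ [] then st.1 ++ [st.2] else st.1

-- the invariant tying A's loop state to B's tree
def pvInv (sA : Option String × List String × List (List (String × String)))
    (tree : List (String × List (List String))) : Prop :=
  match sA.1 with
  | none => tree = [] ∧ sA.2.2 = []
  | some n => ∃ pre subs, tree = pre ++ [(n, subs)] ∧ sA.2.2 = pvRenderAll pre ∧
      (n ≠ "" → subs = pvGroupFlush sA.2.1)

theorem pvRenderAll_append_singleton (pre : List (String × List (List String)))
    (n : String) (subs : List (List String)) :
    pvRenderAll (pre ++ [(n, subs)]) =
      pvRenderAll pre ++ (if n ≠ "" then [pvRenderSection n subs] else []) := by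
  by_cases h : n = "" <;>
    simp [pvRenderAll, List.filter_append, h]

theorem pvGroup_cur_nil (ls : List String) :
    (ls.foldl pvFmtGroupStep ([], [])).2 = [] → (ls.foldl pvFmtGroupStep ([], [])).1 = [] := by
  suffices H : ∀ (st : List (List String) × List String), (st.2 = [] → st.1 = []) →
      ((ls.foldl pvFmtGroupStep st).2 = [] → (ls.foldl pvFmtGroupStep st).1 = []) by
    exact H ([], []) (fun _ => rfl)
  induction ls with
  | nil => intro st h; exact h
  | cons l ls ih =>
    intro st h
    simp only [List.foldl_cons]
    apply ih
    unfold pvFmtGroupStep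
    split_ifs <;> intro hc <;> simp_all

theorem pvGroupFlush_snoc (ls : List String) (line : String) (hne : line ≠ "") :
    pvGroupFlush (ls ++ [line]) = pvSubStep (pvGroupFlush ls) line := by
  have key : ∀ st : List (List String) × List String, (st.2 = [] → st.1 = []) →
      (if (pvFmtGroupStep st line).2 ≠ [] then (pvFmtGroupStep st line).1 ++ [(pvFmtGroupStep st line).2]
        else (pvFmtGroupStep st line).1)
        = pvSubStep (if st.2 ≠ [] then st.1 ++ [st.2] else st.1) line := by
    intro st h
    unfold pvFmtGroupStep pvSubStep
    by_cases hd : PySem.Str.startswith line "-" = true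
    · have hdc : PySem.Chars.startswith line.toList ['-'] = true := by simpa using hd
      by_cases hc : st.2 = [] <;>
        simp [hne, hdc, hc, h]
    · have hdc : PySem.Chars.startswith line.toList ['-'] = false := by
        cases hx : PySem.Chars.startswith line.toList ['-']
        · rfl
        · exact absurd (by simpa using hx) hd
      by_cases hc : st.2 = [] <;>
        simp [hne, hdc, hc, h]
  unfold pvGroupFlush
  rw [List.foldl_append]
  simp only [List.foldl_cons, List.foldl_nil]
  exact key _ (pvGroup_cur_nil ls)

-- "".join through toList: Chars.join with empty separator is flatten
theorem pvCharsJoin_nil_sep (l : List (List Char)) :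
    PySem.Chars.join [] l = l.flatten := by
  induction l with
  | nil => simp [PySem.Chars.join_nil]
  | cons p rest ih =>
    cases rest with
    | nil => simp [PySem.Chars.join_singleton]
    | cons q r => rw [PySem.Chars.join_cons_cons]; simp_all

theorem pvJoin_toList (parts : List String) :
    (PySem.Str.join "" parts).toList = (parts.map String.toList).flatten := by
  rw [PySem.Str.toList_join]
  exact pvCharsJoin_nil_sep _

theorem pvFoldl_acc_append {α β : Type} (l : List α) (f : α → List β) (acc : List β) :
    l.foldl (fun a x => a ++ f x) acc = acc ++ l.flatMap f := by
  induction l generalizing acc with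
  | nil => simp
  | cons x xs ih => simp [ih, List.append_assoc]

-- per-subsection: A's flat html parts concatenate to B's single rendered string
theorem pvSub_render_eq (sub : List String) :
    ((pvHtmlStepA [] sub).map String.toList).flatten = (pvRenderSub sub).toList := by
  unfold pvHtmlStepA pvRenderSub
  by_cases h : sub.length = 1
  · simp [h]
  · simp only [h, if_false]
    simp [List.map_map, Function.comp_def, List.flatten_append,
      pvCharsJoin_nil_sep]

-- the rendering halves agree: A's _format_section = B's _render_section on the grouped lines
theorem pvFormat_eq_render (name : String) (lines : List String) :
    pvFormatSection name lines = pvRenderSection name (pvGroupFlush lines) := by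
  have hA : ∀ subs : List (List String), subs.foldl pvHtmlStepA [] = subs.flatMap (fun s => pvHtmlStepA [] s) := by
    intro subs
    have hstep : ∀ parts sub, pvHtmlStepA parts sub = parts ++ pvHtmlStepA [] sub := by
      intro parts sub
      unfold pvHtmlStepA
      split_ifs <;> simp
    calc subs.foldl pvHtmlStepA []
        = subs.foldl (fun a x => a ++ pvHtmlStepA [] x) [] := by
          congr 1; funext a x; exact hstep a x
      _ = subs.flatMap (fun s => pvHtmlStepA [] s) := by
          rw [pvFoldl_acc_append]; simp
  have hB : ∀ subs : List (List String),
      subs.foldl (fun parts sub => parts ++ [pvRenderSub sub]) [] = subs.map pvRenderSub := by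
    intro subs
    rw [pvFoldl_acc_append]
    simp only [List.nil_append]
    induction subs with
    | nil => rfl
    | cons s r ih => simp [ih]
  have hjoin : ∀ subs : List (List String),
      PySem.Str.join "" (subs.foldl pvHtmlStepA []) =
        PySem.Str.join "" (subs.foldl (fun parts sub => parts ++ [pvRenderSub sub]) []) := by
    intro subs
    apply String.toList_inj.mp
    rw [hA, hB, pvJoin_toList, pvJoin_toList]
    induction subs with
    | nil => simp
    | cons s r ih =>
      simp only [List.flatMap_cons, List.map_cons, List.map_append, List.flatten_cons,
        List.flatten_append, ih]
      congr 1
      exact pvSub_render_eq s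
  unfold pvFormatSection pvRenderSection pvGroupFlush
  simp only [hjoin]

-- one loop step preserves the invariant
theorem pvInv_step (cur : Option String) (curL : List String)
    (secs : List (List (String × String))) (tree : List (String × List (List String)))
    (raw : String) (h : pvInv (cur, curL, secs) tree) :
    pvInv (pvStepA (cur, curL, secs) raw) (pvStepB tree raw) := by
  unfold pvStepA pvStepB
  by_cases hskip : PySem.Str.strip raw = "" ∨ PySem.Str.startswith (PySem.Str.strip raw) "=" = true
  · rw [if_pos hskip, if_pos hskip]; exact h
  · rw [if_neg hskip, if_neg hskip]
    have hne : PySem.Str.strip raw ≠ "" := fun hc => hskip (Or.inl hc)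
    by_cases hbr : PySem.Str.startswith (PySem.Str.strip raw) "[" = true ∧
        PySem.Str.endswith (PySem.Str.strip raw) "]" = true
    · -- new section line
      rw [if_pos hbr, if_pos hbr]
      refine ⟨tree, [], rfl, ?_, fun _ => by simp [pvGroupFlush]⟩
      cases cur with
      | none => simpa [pvTruthy, pvRenderAll, h.1] using h.2
      | some n =>
        obtain ⟨pre, subs, htree, hsecs, hgrp⟩ := h
        rw [htree, pvRenderAll_append_singleton]
        by_cases hn : n = ""
        · subst hn; simpa [pvTruthy] using hsecs
        · have ht : pvTruthy (some n) = true := by simp [pvTruthy, hn]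
          rw [ht, if_pos rfl, if_pos hn, hsecs]
          simp only [Option.getD_some]
          rw [hgrp hn, pvFormat_eq_render]
    · -- content line
      rw [if_neg hbr, if_neg hbr]
      cases cur with
      | none =>
        have ht : tree = [] := h.1
        rw [show pvTruthy none = false from rfl, if_neg (by simp), if_neg (by simp [ht])]
        exact h
      | some n =>
        obtain ⟨pre, subs, htree, hsecs, hgrp⟩ := h
        have htne : tree ≠ [] := by rw [htree]; simp
        have hlast : PySem.List.pyGetD tree (-1) ("", []) = (n, subs) := by
          rw [htree]; exact PySem.List.pyGetD_neg_one_append_singleton pre (n, subs) ("", [])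
        have hdrop : tree.dropLast = pre := by rw [htree]; exact List.dropLast_concat ..
        rw [if_pos htne, hlast, hdrop]
        by_cases hn : n = ""
        · -- falsy current section: A drops the line, B appends inside the dropped ("") entry
          subst hn
          rw [show pvTruthy (some "") = false from rfl, if_neg (by simp)]
          exact ⟨pre, _, rfl, hsecs, fun hc => absurd rfl hc⟩
        · have ht : pvTruthy (some n) = true := by simp [pvTruthy, hn]
          rw [ht, if_pos rfl]
          exact ⟨pre, _, rfl, hsecs, fun _ => by
            rw [hgrp hn, pvGroupFlush_snoc _ _ hne]⟩

theorem pvInv_foldl (lines : List String)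
    (sA : Option String × List String × List (List (String × String)))
    (tree : List (String × List (List String))) (h : pvInv sA tree) :
    pvInv (lines.foldl pvStepA sA) (lines.foldl pvStepB tree) := by
  induction lines generalizing sA tree with
  | nil => exact h
  | cons l ls ih =>
    obtain ⟨cur, curL, secs⟩ := sA
    exact ih _ _ (pvInv_step cur curL secs tree l h)

-- ===== VERDICT (by name: the statement is the Claim_ definition above) =====
theorem generate_key_components_py_spec : Claim_equal_generate_key_components_py := by
  intro s _
  unfold Spec_generate_key_components_py generate_key_components_py generate_key_components_py_alt
  have hinv := pvInv_foldl ((PySem.Str.split? s "\n").getD []) (none, [], []) [] ⟨rfl, rfl⟩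
  set fin := ((PySem.Str.split? s "\n").getD []).foldl pvStepA (none, [], []) with hfin
  set tree := ((PySem.Str.split? s "\n").getD []).foldl pvStepB [] with htree
  have hfinal : (if pvTruthy fin.1 then fin.2.2 ++ [pvFormatSection (fin.1.getD "") fin.2.1]
      else fin.2.2) = pvRenderAll tree := by
    rcases hc : fin.1 with _ | n
    · have h' : pvInv fin tree := hinv
      unfold pvInv at h'; rw [hc] at h'
      rw [show pvTruthy none = false from rfl, if_neg (by simp)]
      simp [h'.1, h'.2, pvRenderAll]
    · have h' : pvInv fin tree := hinv
      unfold pvInv at h'; rw [hc] at h'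
      obtain ⟨pre, subs, ht, hsecs, hgrp⟩ := h'
      rw [ht, pvRenderAll_append_singleton]
      by_cases hn : n = ""
      · subst hn
        rw [show pvTruthy (some "") = false from rfl, if_neg (by simp), if_neg (by simp)]
        simpa using hsecs
      · have htr : pvTruthy (some n) = true := by simp [pvTruthy, hn]
        rw [htr, if_pos rfl, if_pos hn, hsecs]
        simp only [Option.getD_some]
        rw [hgrp hn, pvFormat_eq_render]
  simp only []
  rw [hfinal]
  rfl
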